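-- pv_equiv track=rewrite | github.com/dontlukeback/govcon-intel | generate_newsletter.py | apos
-- ===== SOURCE A (Python) =====
-- def apos(text):
--     """Clean text for HTML: smart quotes, em dashes, no html.escape mangling."""
--     if not text:
--         return ""
--     text = text.replace("&", "&amp;")
--     text = text.replace("<", "&lt;").replace(">", "&gt;")
--     text = text.replace(" -- ", "&mdash;")
--     text = text.replace("--", "&mdash;")
--
--     # Smart single quotes: 'word' -> &lsquo;word&rsquo;, it's -> it&rsquo;s
--     # After a letter/digit/period = closing/apostrophe, otherwise = opening
--     out = []
--     for i, ch in enumerate(text):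
--         if ch == "'":
--             prev = text[i - 1] if i > 0 else " "
--             if prev.isalpha() or prev.isdigit() or prev in ".!?),":
--                 out.append("&rsquo;")  # apostrophe or closing
--             else:
--                 out.append("&lsquo;")  # opening
--         elif ch == '"':
--             prev = text[i - 1] if i > 0 else " "
--             if prev.isalpha() or prev.isdigit() or prev in ".!?),":
--                 out.append("&rdquo;")
--             else:
--                 out.append("&ldquo;")
--         else:
--             out.append(ch)
--     return "".join(out)
-- ===== SOURCE B (Python) =====
-- import re
--
-- _CLOSE = {"'": "&rsquo;", '"': "&rdquo;"}
--
--
-- def apos(text):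
--     """Clean text for HTML: smart quotes, em dashes, no html.escape mangling."""
--     for old, new in (("&", "&amp;"), ("<", "&lt;"), (">", "&gt;"),
--                      (" -- ", "&mdash;"), ("--", "&mdash;")):
--         text = text.replace(old, new)
--
--     def smart(m):
--         prev, quote = m.group(1), m.group(2)
--         if prev.isalpha() or prev.isdigit() or prev in ".!?),":
--             return prev + _CLOSE[quote]
--         return prev + quote
--
--     # Stage 1: close every quote that follows a word/closing character.
--     text = re.sub(r"(.)(['\"])", smart, text, flags=re.DOTALL)
--     # Stage 2: every quote still left is an opening one.
--     return text.replace("'", "&lsquo;").replace('"', "&ldquo;")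
-- ===== Notes on version B (the rewrite author's own statement) =====
-- stated objective: alternative
-- what changed: A's single index loop over enumerate(text) reading text[i-1] is replaced by two staged passes: a regex substitution over two-character (predecessor, quote) matches that rewrites quotes following a word/closing character, then plain str.replace calls that turn every remaining quote into an opening entity; the five HTML/mdash replaces are kept verbatim.
import Mathlib
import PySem

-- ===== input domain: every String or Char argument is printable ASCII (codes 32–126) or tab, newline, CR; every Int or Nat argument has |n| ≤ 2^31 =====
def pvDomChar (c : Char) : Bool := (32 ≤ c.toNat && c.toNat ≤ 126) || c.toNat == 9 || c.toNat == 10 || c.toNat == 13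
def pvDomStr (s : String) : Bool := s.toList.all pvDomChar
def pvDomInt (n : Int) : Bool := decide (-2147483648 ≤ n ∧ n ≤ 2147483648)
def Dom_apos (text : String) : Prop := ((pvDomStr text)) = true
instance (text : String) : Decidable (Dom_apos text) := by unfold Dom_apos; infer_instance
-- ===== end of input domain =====

-- B replaces A's single index loop (enumerate + text[i-1]) by two staged passes: a
-- regex-style substitution over two-character matches (predecessor, quote) that closes
-- quotes after word/closing characters, then plain replaces that open every remaining
-- quote. Objective: alternative decomposition, same cost.

-- ===== PORT A =====
-- one iteration of A's quote loop: the string piece appended for character ch at index i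
def aposStep (l : List Char) (i : Int) (ch : Char) : List Char :=
  if ch = '\'' then
    let prev := if i > 0 then PySem.List.pyGetD l (i - 1) ' ' else ' '
    if PySem.Chars.isalpha prev || PySem.Chars.isdigit prev
        || PySem.Chars.isIn [prev] ".!?),".toList
    then "&rsquo;".toList else "&lsquo;".toList
  else if ch = '"' then
    let prev := if i > 0 then PySem.List.pyGetD l (i - 1) ' ' else ' '
    if PySem.Chars.isalpha prev || PySem.Chars.isdigit prev
        || PySem.Chars.isIn [prev] ".!?),".toList
    then "&rdquo;".toList else "&ldquo;".toList
  else [ch]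

def apos (text : String) : String :=
  if text = "" then "" else
  let t1 := PySem.Chars.replace text.toList "&".toList "&amp;".toList
  let t2 := PySem.Chars.replace (PySem.Chars.replace t1 "<".toList "&lt;".toList) ">".toList "&gt;".toList
  let t3 := PySem.Chars.replace t2 " -- ".toList "&mdash;".toList
  let t4 := PySem.Chars.replace t3 "--".toList "&mdash;".toList
  String.ofList (PySem.Chars.join []
    ((PySem.List.enumerate t4 0).foldl (fun out p => out ++ [aposStep t4 p.1 p.2]) []))

-- ===== PORT B =====
-- B's closing test: prev.isalpha() or prev.isdigit() or prev in ".!?),"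
def aposCloser (c : Char) : Bool :=
  PySem.Chars.isalpha c || PySem.Chars.isdigit c
    || PySem.Chars.isIn [c] ".!?),".toList

-- hand port of re.sub(r"(.)(['\"])", smart, text, flags=re.DOTALL): leftmost,
-- non-overlapping two-character matches, the scan resumes after each match;
-- exact for this two-character pattern
def aposSubPass : List Char → List Char
  | [] => []
  | [c] => [c]
  | a :: b :: rest =>
    if b = '\'' ∨ b = '"' then
      (if aposCloser a then
        a :: (if b = '\'' then "&rsquo;".toList else "&rdquo;".toList)
      else [a, b]) ++ aposSubPass rest
    else a :: aposSubPass (b :: rest)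

def apos_alt (text : String) : String :=
  let t1 := PySem.Chars.replace text.toList "&".toList "&amp;".toList
  let t2 := PySem.Chars.replace (PySem.Chars.replace t1 "<".toList "&lt;".toList) ">".toList "&gt;".toList
  let t3 := PySem.Chars.replace t2 " -- ".toList "&mdash;".toList
  let t4 := PySem.Chars.replace t3 "--".toList "&mdash;".toList
  let t5 := aposSubPass t4
  String.ofList (PySem.Chars.replace
    (PySem.Chars.replace t5 "'".toList "&lsquo;".toList) "\"".toList "&ldquo;".toList)

-- ===== PRECONDITION & SPEC =====
def Spec_apos (text : String) (out : String) : Prop := out = apos_alt text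
instance (text : String) (out : String) : Decidable (Spec_apos text out) := by unfold Spec_apos; infer_instance

-- ===== CLAIM (what is proved, stated in full; the proofs are below) =====
def Claim_equal_apos : Prop := ∀ (text : String), Dom_apos text → Spec_apos text (apos text)

-- ===== LEMMAS AND PROOFS =====

-- the per-character result as a function of the predecessor character
def aposSub (prev ch : Char) : List Char :=
  if ch = '\'' then (if aposCloser prev then "&rsquo;".toList else "&lsquo;".toList)
  else if ch = '"' then (if aposCloser prev then "&rdquo;".toList else "&ldquo;".toList)
  else [ch]

-- the intended result of the whole quote stage, threading the predecessor
def aposSpecF : Char → List Char → List Char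
  | _, [] => []
  | prev, c :: rest => aposSub prev c ++ aposSpecF c rest

-- B's second stage as a per-character function
def aposRepC (c : Char) : List Char :=
  if c = '\'' then "&lsquo;".toList else if c = '"' then "&ldquo;".toList else [c]

lemma join_nil_flatten (L : List (List Char)) : PySem.Chars.join [] L = L.flatten := by
  induction L with
  | nil => rfl
  | cons a t ih =>
    cases t with
    | nil => simp [PySem.Chars.join_singleton]
    | cons b t2 => rw [PySem.Chars.join_cons_cons]; simp [ih]

lemma apos_prev (pre suf : List Char) :
    (if ((pre.length : Int)) > 0 then PySem.List.pyGetD (pre ++ suf) ((pre.length : Int) - 1) ' ' else ' ')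
      = pre.getLastD ' ' := by
  cases pre with
  | nil => simp
  | cons a p =>
    have h1 : (((a::p).length : Nat) : Int) - 1 = ((p.length : Nat) : Int) := by simp
    rw [if_pos (by simp), h1, PySem.List.pyGetD_natCast]
    have h2 : p.length < ((a::p) ++ suf).length := by simp
    rw [List.getD_eq_getElem _ _ h2, List.getElem_append_left (by simp)]
    rw [List.getLastD_eq_getLast?, List.getLast?_eq_getElem?]
    simp

lemma aposStep_eq_sub (pre suf : List Char) (c : Char) :
    aposStep (pre ++ suf) (pre.length : Int) c = aposSub (pre.getLastD ' ') c := by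
  have hprev := apos_prev pre suf
  by_cases h1 : c = '\''
  · subst h1; simp only [aposStep, aposSub, aposCloser, hprev]; simp
  · by_cases h2 : c = '"'
    · subst h2
      simp only [aposStep, aposSub, aposCloser, hprev,
        show ('"' = '\'') = False from by simp]
      simp
    · simp only [aposStep, aposSub, if_neg h1, if_neg h2]

-- A's quote loop computes aposSpecF of the predecessor-threaded string
lemma apos_loop (suf : List Char) : ∀ (pre : List Char) (acc : List (List Char)),
    ((PySem.List.enumerate suf (pre.length : Int)).foldl
        (fun out p => out ++ [aposStep (pre ++ suf) p.1 p.2]) acc).flatten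
      = acc.flatten ++ aposSpecF (pre.getLastD ' ') suf := by
  induction suf with
  | nil => intro pre acc; simp [PySem.List.enumerate_nil, aposSpecF]
  | cons c rest ih =>
    intro pre acc
    rw [PySem.List.enumerate_cons, List.foldl_cons]
    have hstep := aposStep_eq_sub pre (c :: rest) c
    have hlen : (pre.length : Int) + 1 = ((pre ++ [c]).length : Int) := by simp
    have happ : pre ++ c :: rest = (pre ++ [c]) ++ rest := by simp
    rw [hstep, hlen, happ, ih (pre ++ [c]) (acc ++ [aposSub (pre.getLastD ' ') c])]
    simp [aposSpecF]

-- PySem.Chars.replace with a one-character pattern is a flatMap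
lemma replace_go_single (o : Char) (n : List Char) :
    ∀ (l acc : List Char) (fuel : Nat), l.length ≤ fuel →
      PySem.Chars.replace.go [o] n fuel l acc
        = acc.reverse ++ l.flatMap (fun c => if c = o then n else [c]) := by
  intro l
  induction l with
  | nil =>
    intro acc fuel _
    cases fuel <;> simp [PySem.Chars.replace.go]
  | cons c t ih =>
    intro acc fuel h
    cases fuel with
    | zero => simp at h
    | succ f =>
      rw [show PySem.Chars.replace.go [o] n (f+1) (c::t) acc
            = if [o].isPrefixOf (c::t) then
                PySem.Chars.replace.go [o] n f (List.drop 1 (c::t)) (n.reverse ++ acc)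
              else PySem.Chars.replace.go [o] n f t (c :: acc) from rfl]
      by_cases hc : o = c
      · subst hc
        rw [if_pos (by simp [List.isPrefixOf])]
        simp only [List.drop_succ_cons, List.drop_zero]
        rw [ih (n.reverse ++ acc) f (by simpa using h)]
        simp
      · rw [if_neg (by simp [List.isPrefixOf, hc])]
        rw [ih (c :: acc) f (by simpa using h)]
        simp [Ne.symm hc]

lemma replace_single (o : Char) (n l : List Char) :
    PySem.Chars.replace l [o] n = l.flatMap (fun c => if c = o then n else [c]) := by
  rw [PySem.Chars.replace]
  rw [if_neg (by simp)]
  simpa using replace_go_single o n l [] l.length le_rfl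

-- B's two trailing replaces together are the flatMap of aposRepC
lemma rep_eq (l : List Char) :
    PySem.Chars.replace (PySem.Chars.replace l "'".toList "&lsquo;".toList)
        "\"".toList "&ldquo;".toList
      = l.flatMap aposRepC := by
  rw [show ("'".toList) = ['\''] from rfl, show ("\"".toList) = ['"'] from rfl,
    replace_single, replace_single]
  induction l with
  | nil => rfl
  | cons c t ih =>
    simp only [List.flatMap_cons, List.flatMap_append, ih]
    congr 1
    by_cases h1 : c = '\''
    · subst h1; decide
    · by_cases h2 : c = '"'
      · subst h2; decide
      · simp [aposRepC, h1, h2]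

-- a character whose predecessor cannot close it contributes aposRepC
lemma repC_eq_sub (prev a : Char) (h : aposCloser prev = false ∨ ¬(a = '\'' ∨ a = '"')) :
    aposRepC a = aposSub prev a := by
  by_cases hq : a = '\'' ∨ a = '"'
  · have hcl : aposCloser prev = false := h.resolve_right (not_not_intro hq)
    rcases hq with rfl | rfl <;> simp [aposRepC, aposSub, hcl]
  · push_neg at hq
    simp [aposRepC, aposSub, hq.1, hq.2]

-- closers are never quotes
lemma closer_ne_quote {a : Char} (h : aposCloser a = true) : a ≠ '\'' ∧ a ≠ '"' := by
  constructor <;> rintro rfl <;>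
    simp [show aposCloser '\'' = false from by decide,
      show aposCloser '"' = false from by decide] at h

-- B's two stages compute aposSpecF, provided the leading character cannot be closed
-- by the predecessor (prev is not a closer, or the head is not a quote)
lemma subPass_spec (l : List Char) : ∀ (prev : Char),
    (aposCloser prev = false ∨ ∀ c, l.head? = some c → ¬(c = '\'' ∨ c = '"')) →
    (aposSubPass l).flatMap aposRepC = aposSpecF prev l := by
  induction l using aposSubPass.induct with
  | case1 =>
    intro prev _; simp [aposSubPass, aposSpecF]
  | case2 c =>
    intro prev h
    have h' : aposCloser prev = false ∨ ¬(c = '\'' ∨ c = '"') := by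
      rcases h with h | h
      · exact Or.inl h
      · exact Or.inr (h c rfl)
    simp [aposSubPass, aposSpecF, repC_eq_sub prev c h']
  | case3 a b rest hb ih =>
    intro prev h
    have h' : aposCloser prev = false ∨ ¬(a = '\'' ∨ a = '"') := by
      rcases h with h | h
      · exact Or.inl h
      · exact Or.inr (h a rfl)
    have hbcl : aposCloser b = false := by
      rcases hb with rfl | rfl <;> decide
    have hrest := ih b (Or.inl hbcl)
    simp only [aposSubPass, if_pos hb, List.flatMap_append, hrest, aposSpecF]
    by_cases hca : aposCloser a
    · have hne := closer_ne_quote hca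
      have ha' : aposRepC a = [a] := by simp [aposRepC, hne.1, hne.2]
      have hsa : aposSub prev a = [a] := by simp [aposSub, hne.1, hne.2]
      have hq : List.flatMap aposRepC (if b = '\'' then "&rsquo;".toList else "&rdquo;".toList)
          = aposSub a b := by
        rcases hb with rfl | rfl <;> simp [aposSub, hca] <;> decide
      rw [if_pos hca, List.flatMap_cons, ha', hq, hsa]
      simp
    · have hca' : aposCloser a = false := by simpa using hca
      have hra := repC_eq_sub prev a h'
      have hrb : aposRepC b = aposSub a b := by
        rcases hb with rfl | rfl <;> simp [aposRepC, aposSub, hca']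
      simp [if_neg hca, List.flatMap_cons, hra, hrb]
  | case4 a b rest hb ih =>
    intro prev h
    have h' : aposCloser prev = false ∨ ¬(a = '\'' ∨ a = '"') := by
      rcases h with h | h
      · exact Or.inl h
      · exact Or.inr (h a rfl)
    have hrest := ih a (Or.inr (by intro c hc; cases hc; exact hb))
    simp only [aposSubPass, if_neg hb, List.flatMap_cons, hrest, aposSpecF]
    rw [repC_eq_sub prev a h']

-- ===== VERDICT (by name: the statement is the Claim_ definition above) =====
theorem apos_spec : Claim_equal_apos := by
  intro text _
  unfold Spec_apos apos apos_alt
  by_cases h : text = ""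
  · subst h; decide
  · simp only [if_neg h]
    refine congrArg String.ofList ?_
    rw [join_nil_flatten, rep_eq]
    have hloop := apos_loop
      (PySem.Chars.replace (PySem.Chars.replace (PySem.Chars.replace (PySem.Chars.replace (PySem.Chars.replace text.toList "&".toList "&amp;".toList) "<".toList "&lt;".toList) ">".toList "&gt;".toList) " -- ".toList "&mdash;".toList) "--".toList "&mdash;".toList)
      [] []
    simp only [List.length_nil, Nat.cast_zero, List.nil_append, List.getLastD_nil,
      List.flatten_nil] at hloop
    rw [hloop, subPass_spec _ ' ' (Or.inl (by decide))]
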